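-- pv_equiv track=rewrite | github.com/CornellNLP/CS4300_Flask_template | app/irsystem/controllers/search_controller.py | sort_recipes
-- ===== SOURCE A (Python) =====
-- def sort_recipes(recipes):
--     breakfast = []
--     lunch = []
--     dinner = []
--     for r in recipes:
--         if r["meal_type"] == "breakfast":
--             breakfast.append(r)
--         elif r["meal_type"] == "lunch":
--             lunch.append(r)
--         else:
--             dinner.append(r)
--     return breakfast, lunch, dinner
-- ===== SOURCE B (Python) =====
-- def sort_recipes(recipes):
--     # Divide and conquer: split in half, partition each half recursively,
--     # concatenate the three buckets. Correct because partitioning a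
--     # concatenation is the concatenation of the partitions (order preserved).
--     def part(rs):
--         if len(rs) <= 1:
--             if not rs:
--                 return [], [], []
--             r = rs[0]
--             mt = r["meal_type"]
--             if mt == "breakfast":
--                 return [r], [], []
--             if mt == "lunch":
--                 return [], [r], []
--             return [], [], [r]
--         m = len(rs) // 2
--         b1, l1, d1 = part(rs[:m])
--         b2, l2, d2 = part(rs[m:])
--         return b1 + b2, l1 + l2, d1 + d2
--     return part(recipes)
-- ===== Notes on version B (the rewrite author's own statement) =====
-- stated objective: alternative
-- what changed: Replaces A's single linear loop accumulating into three lists with a divide-and-conquer partition: split the list in half, recursively partition each half, concatenate the three buckets (order preserved by concatenation).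
import Mathlib
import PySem

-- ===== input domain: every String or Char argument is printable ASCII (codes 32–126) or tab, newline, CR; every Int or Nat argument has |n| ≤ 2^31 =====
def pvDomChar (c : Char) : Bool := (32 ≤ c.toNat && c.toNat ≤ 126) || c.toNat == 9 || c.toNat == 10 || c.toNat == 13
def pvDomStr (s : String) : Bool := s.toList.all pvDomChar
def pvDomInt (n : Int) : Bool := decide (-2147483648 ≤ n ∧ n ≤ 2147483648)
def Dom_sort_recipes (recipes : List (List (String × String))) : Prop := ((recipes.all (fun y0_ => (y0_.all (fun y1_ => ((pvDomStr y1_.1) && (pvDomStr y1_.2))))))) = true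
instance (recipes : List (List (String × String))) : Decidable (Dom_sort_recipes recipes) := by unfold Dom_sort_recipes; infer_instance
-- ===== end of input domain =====

-- B replaces A's single accumulating loop with a divide-and-conquer partition (split in half, recurse, concatenate buckets); alternative decomposition, same results.


-- ===== PORT A =====
-- r["meal_type"]: first-match lookup in the association list (Python dict); KeyError (none) is excluded by Pre_.
def pvMeal (r : List (String × String)) : Option String := r.lookup "meal_type"

-- the loop body: append r to the matching accumulator
def pvStepA (acc : (List (List (String × String))) × (List (List (String × String))) × (List (List (String × String)))) (r : List (String × String)) : (List (List (String × String))) × (List (List (String × String))) × (List (List (String × String))) :=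
  if pvMeal r = some "breakfast" then (acc.1 ++ [r], acc.2.1, acc.2.2)
  else if pvMeal r = some "lunch" then (acc.1, acc.2.1 ++ [r], acc.2.2)
  else (acc.1, acc.2.1, acc.2.2 ++ [r])

def sort_recipes (recipes : List (List (String × String))) : (List (List (String × String))) × (List (List (String × String))) × (List (List (String × String))) :=
  recipes.foldl pvStepA ([], [], [])

-- ===== PORT B =====
-- the inner 'part': divide and conquer on the list, rs[:m] / rs[m:] = take / drop
def pvPartB : List (List (String × String)) → (List (List (String × String))) × (List (List (String × String))) × (List (List (String × String)))
  | [] => ([], [], [])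
  | [r] =>
      if pvMeal r = some "breakfast" then ([r], [], [])
      else if pvMeal r = some "lunch" then ([], [r], [])
      else ([], [], [r])
  | a :: b :: tl =>
      let m := (a :: b :: tl).length / 2
      let p1 := pvPartB ((a :: b :: tl).take m)
      let p2 := pvPartB ((a :: b :: tl).drop m)
      (p1.1 ++ p2.1, p1.2.1 ++ p2.2.1, p1.2.2 ++ p2.2.2)
termination_by rs => rs.length
decreasing_by
  · simp [List.length_take]; omega
  · simp [List.length_drop]; omega

def sort_recipes_alt (recipes : List (List (String × String))) : (List (List (String × String))) × (List (List (String × String))) × (List (List (String × String))) :=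
  pvPartB recipes

-- ===== PRECONDITION & SPEC =====
-- Pre_: every recipe has a "meal_type" key; otherwise both Pythons raise KeyError.
def Pre_sort_recipes (recipes : List (List (String × String))) : Prop :=
  ∀ r ∈ recipes, (pvMeal r).isSome
instance (recipes : List (List (String × String))) : Decidable (Pre_sort_recipes recipes) := by unfold Pre_sort_recipes; infer_instance

def pvWitness_sort_recipes : (List (List (String × String))) :=
  [[("meal_type", "lunch"), ("name", "soup")], [("meal_type", "dinner")], [("meal_type", "breakfast")]]

def Spec_sort_recipes (recipes : List (List (String × String))) (out : (List (List (String × String))) × (List (List (String × String))) × (List (List (String × String)))) : Prop := out = sort_recipes_alt recipes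
instance (recipes : List (List (String × String))) (out : (List (List (String × String))) × (List (List (String × String))) × (List (List (String × String)))) : Decidable (Spec_sort_recipes recipes out) := by unfold Spec_sort_recipes; infer_instance

-- ===== CLAIM (what is proved, stated in full; the proofs are below) =====
def Claim_equal_sort_recipes : Prop := ∀ (recipes : List (List (String × String))), Dom_sort_recipes recipes → Pre_sort_recipes recipes → Spec_sort_recipes recipes (sort_recipes recipes)

-- ===== LEMMAS AND PROOFS =====

-- the common characterisation: both programs compute the three filters, in order
def pvFilters (rs : List (List (String × String))) : (List (List (String × String))) × (List (List (String × String))) × (List (List (String × String))) :=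
  (rs.filter (fun r => pvMeal r = some "breakfast"),
   rs.filter (fun r => pvMeal r = some "lunch"),
   rs.filter (fun r => ¬ (pvMeal r = some "breakfast" ∨ pvMeal r = some "lunch")))

-- A's loop invariant: folding appends each filter's contribution to the accumulators
theorem pvFold_inv (recipes : List (List (String × String)))
    (b l d : List (List (String × String))) :
    recipes.foldl pvStepA (b, l, d) =
      (b ++ (pvFilters recipes).1, l ++ (pvFilters recipes).2.1, d ++ (pvFilters recipes).2.2) := by
  induction recipes generalizing b l d with
  | nil => simp [pvFilters]
  | cons r rs ih =>
      simp only [List.foldl_cons, pvFilters, List.filter_cons, pvStepA]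
      by_cases hb : pvMeal r = some "breakfast"
      · simp [hb, ih, pvFilters]
      · by_cases hl : pvMeal r = some "lunch"
        · simp [hl, ih, pvFilters]
        · simp [hb, hl, ih, pvFilters]

-- B's characterisation: divide and conquer computes the same filters (filter distributes over take ++ drop)
theorem pvPartB_eq : ∀ rs : List (List (String × String)), pvPartB rs = pvFilters rs
  | [] => by simp [pvPartB, pvFilters]
  | [r] => by
      by_cases hb : pvMeal r = some "breakfast"
      · simp [pvPartB, pvFilters, hb]
      · by_cases hl : pvMeal r = some "lunch"
        · simp [pvPartB, pvFilters, hl]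
        · simp [pvPartB, pvFilters, hb, hl]
  | a :: b :: tl => by
      have h1 := pvPartB_eq ((a :: b :: tl).take ((a :: b :: tl).length / 2))
      have h2 := pvPartB_eq ((a :: b :: tl).drop ((a :: b :: tl).length / 2))
      rw [pvPartB, h1, h2]
      simp only [pvFilters]
      refine Prod.ext ?_ (Prod.ext ?_ ?_) <;>
        simp [← List.filter_append, List.take_append_drop]
termination_by rs => rs.length
decreasing_by
  · simp [List.length_take]; omega
  · simp [List.length_drop]; omega

-- ===== VERDICT (by name: the statement is the Claim_ definition above) =====
theorem sort_recipes_spec : Claim_equal_sort_recipes := by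
  intro recipes _ _
  show sort_recipes recipes = sort_recipes_alt recipes
  rw [sort_recipes, sort_recipes_alt, pvFold_inv, pvPartB_eq]
  simp
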